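-- pv_equiv track=rewrite | github.com/vikasagarwal11/aethersignal | src/ai/portfolio_model.py | _extract_rpf_priority
-- ===== SOURCE A (Python) =====
-- from typing import Dict, Any, List, Optional
--
-- def _extract_rpf_priority(product_signals: List[Dict[str, Any]]) -> Optional[str]:
--     """Extract highest RPF priority from product signals."""
--     if not product_signals:
--         return None
--
--     priorities = []
--     for sig in product_signals:
--         priority = sig.get("priority") or sig.get("qsp_priority") or sig.get("rpf_priority")
--         if priority:
--             priorities.append(priority)
--
--     # Return highest priority
--     priority_order = ["Critical", "High", "Medium", "Low"]
--     for p in priority_order: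
--         if p in priorities:
--             return p
--
--     return priorities[0] if priorities else None
-- ===== SOURCE B (Python) =====
-- def _extract_rpf_priority(product_signals):
--     """Single pass: track the best (lowest) rank among ordered labels and the first truthy priority."""
--     order = ["Critical", "High", "Medium", "Low"]
--     best = None
--     first = None
--     for sig in product_signals:
--         p = sig.get("priority") or sig.get("qsp_priority") or sig.get("rpf_priority")
--         if p:
--             if first is None:
--                 first = p
--             if p in order:
--                 r = order.index(p)
--                 if best is None or r < best:
--                     best = r
--     return order[best] if best is not None else first
-- ===== Notes on version B (the rewrite author's own statement) =====
-- stated objective: simpler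
-- what changed: Replaced A's two-phase logic (collect every truthy priority into a list, then scan the fixed order list with membership tests, then fall back to priorities[0]) by a single fold over product_signals maintaining the running best rank and the first truthy priority.
import Mathlib
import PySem

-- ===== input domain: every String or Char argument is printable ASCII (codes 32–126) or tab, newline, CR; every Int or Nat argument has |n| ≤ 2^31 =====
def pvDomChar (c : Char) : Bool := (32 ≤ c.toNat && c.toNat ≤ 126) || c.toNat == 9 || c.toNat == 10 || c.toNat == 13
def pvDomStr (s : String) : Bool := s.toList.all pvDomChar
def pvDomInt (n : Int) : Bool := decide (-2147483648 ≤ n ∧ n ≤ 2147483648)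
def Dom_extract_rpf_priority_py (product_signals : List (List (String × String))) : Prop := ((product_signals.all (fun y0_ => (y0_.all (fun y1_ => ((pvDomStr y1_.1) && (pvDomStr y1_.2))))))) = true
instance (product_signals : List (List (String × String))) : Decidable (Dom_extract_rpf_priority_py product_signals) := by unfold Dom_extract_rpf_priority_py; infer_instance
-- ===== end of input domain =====

-- B replaces A's collect-all-then-scan-the-order-list phases by a single fold that keeps
-- the running best rank and the first truthy priority (objective: simpler one-pass decomposition).

-- ===== PORT A =====
-- sig.get("priority") or sig.get("qsp_priority") or sig.get("rpf_priority")
-- (Python `or`: a falsy value — None or "" — falls through to the next operand)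
def pyOrS (a b : Option String) : Option String :=
  match a with
  | some s => if s = "" then b else some s
  | none => b

def sigPriority (sig : List (String × String)) : Option String :=
  pyOrS ((PySem.Dict.mk sig).get? "priority")
    (pyOrS ((PySem.Dict.mk sig).get? "qsp_priority") ((PySem.Dict.mk sig).get? "rpf_priority"))

-- loop body: `if priority: priorities.append(priority)` (truthy = some nonempty string)
def stepA (acc : List String) (sig : List (String × String)) : List String :=
  match sigPriority sig with
  | some p => if p = "" then acc else acc ++ [p]
  | none => acc

def extract_rpf_priority_py (product_signals : List (List (String × String))) : Option String :=
  if product_signals = [] then none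
  else
    let priorities := product_signals.foldl stepA []
    match (["Critical", "High", "Medium", "Low"] : List String).find?
        (fun p => priorities.contains p) with
    | some p => some p
    | none => priorities.head?   -- priorities[0] if priorities else None

-- ===== PORT B =====
def prOrder : List String := ["Critical", "High", "Medium", "Low"]

-- body of B's loop once p is known truthy: update (best, first)
def updB (st : Option Nat × Option String) (p : String) : Option Nat × Option String :=
  let first := match st.2 with | none => some p | some f => some f
  if prOrder.contains p then
    let r := prOrder.idxOf p
    let best :=
      match st.1 with
      | none => some r
      | some b => if r < b then some r else some b
    (best, first)
  else (st.1, first)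

def loopB (st : Option Nat × Option String) (sig : List (String × String)) :
    Option Nat × Option String :=
  match sigPriority sig with
  | some p => if p = "" then st else updB st p
  | none => st

def extract_rpf_priority_py_alt (product_signals : List (List (String × String))) : Option String :=
  let st := product_signals.foldl loopB (none, none)
  match st.1 with
  | some r => prOrder[r]?   -- order[best] (best is always a valid index)
  | none => st.2            -- first, possibly None

-- ===== PRECONDITION & SPEC =====
def Spec_extract_rpf_priority_py (product_signals : List (List (String × String))) (out : Option String) : Prop := out = extract_rpf_priority_py_alt product_signals
instance (product_signals : List (List (String × String))) (out : Option String) : Decidable (Spec_extract_rpf_priority_py product_signals out) := by unfold Spec_extract_rpf_priority_py; infer_instance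

-- ===== CLAIM (what is proved, stated in full; the proofs are below) =====
def Claim_equal_extract_rpf_priority_py : Prop := ∀ (product_signals : List (List (String × String))), Dom_extract_rpf_priority_py product_signals → Spec_extract_rpf_priority_py product_signals (extract_rpf_priority_py product_signals)

-- ===== LEMMAS AND PROOFS =====

-- the truthy priority extracted from one signal, as an Option
def fTruthy (sig : List (String × String)) : Option String :=
  match sigPriority sig with
  | some p => if p = "" then none else some p
  | none => none

-- best rank present in a list, determined by membership in the four labels
def bestM (L : List String) : Option Nat :=
  if L.contains "Critical" then some 0
  else if L.contains "High" then some 1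
  else if L.contains "Medium" then some 2
  else if L.contains "Low" then some 3
  else none

def minb : Option Nat → Option Nat → Option Nat
  | none, b => b
  | some a, none => some a
  | some a, some b => some (min a b)

theorem stepA_eq (acc : List String) (sig : List (String × String)) :
    stepA acc sig = match fTruthy sig with | some p => acc ++ [p] | none => acc := by
  simp only [stepA, fTruthy]
  cases sigPriority sig with
  | none => rfl
  | some p => by_cases hp : p = "" <;> simp [hp]

theorem loopB_eq (st : Option Nat × Option String) (sig : List (String × String)) :
    loopB st sig = match fTruthy sig with | some p => updB st p | none => st := by
  simp only [loopB, fTruthy]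
  cases sigPriority sig with
  | none => rfl
  | some p => by_cases hp : p = "" <;> simp [hp]

theorem foldA_eq (ps : List (List (String × String))) :
    ∀ acc, ps.foldl stepA acc = acc ++ ps.filterMap fTruthy := by
  induction ps with
  | nil => simp
  | cons s t ih =>
    intro acc
    rw [List.foldl_cons, List.filterMap_cons, stepA_eq, ih]
    cases fTruthy s <;> simp

theorem foldB_eq (ps : List (List (String × String))) :
    ∀ st, ps.foldl loopB st = (ps.filterMap fTruthy).foldl updB st := by
  induction ps with
  | nil => simp
  | cons s t ih =>
    intro st
    rw [List.foldl_cons, List.filterMap_cons, loopB_eq, ih]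
    cases fTruthy s <;> simp

theorem minb_zero (b : Option Nat) : minb (some 0) b = some 0 := by
  cases b <;> simp [minb]

theorem bestM_cons (p : String) (t : List String) :
    bestM (p :: t) =
      (if prOrder.contains p then minb (some (prOrder.idxOf p)) (bestM t) else bestM t) := by
  by_cases h0 : p = "Critical"
  · subst h0; simp [bestM, prOrder, minb_zero]
  by_cases h1 : p = "High"
  · subst h1; simp only [bestM, prOrder]
    norm_num [List.contains_cons]
    split_ifs <;> simp_all [minb]
  by_cases h2 : p = "Medium"
  · subst h2; simp only [bestM, prOrder]
    norm_num [List.contains_cons]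
    split_ifs <;> simp_all [minb]
  by_cases h3 : p = "Low"
  · subst h3; simp only [bestM, prOrder]
    norm_num [List.contains_cons]
    split_ifs <;> simp_all [minb]
  · have c0 : "Critical" ≠ p := fun h => h0 h.symm
    have c1 : "High" ≠ p := fun h => h1 h.symm
    have c2 : "Medium" ≠ p := fun h => h2 h.symm
    have c3 : "Low" ≠ p := fun h => h3 h.symm
    simp [bestM, prOrder, h0, h1, h2, h3, c0, c1, c2, c3]

theorem minb_assoc (a b c : Option Nat) : minb (minb a b) c = minb a (minb b c) := by
  cases a <;> cases b <;> cases c <;> simp [minb, Nat.min_assoc]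

theorem foldUpd_eq (L : List String) :
    ∀ b0 f0, L.foldl updB (b0, f0) = (minb b0 (bestM L), f0.or L.head?) := by
  induction L with
  | nil => intro b0 f0; cases b0 <;> cases f0 <;> simp [bestM, minb, Option.or]
  | cons p t ih =>
    intro b0 f0
    rw [List.foldl_cons]
    have hstep : updB (b0, f0) p =
        ((if prOrder.contains p then minb b0 (some (prOrder.idxOf p)) else b0),
          f0.or (some p)) := by
      simp only [updB]
      split_ifs with h
      · cases b0 <;> cases f0 <;> simp [minb, Nat.min_def, Option.or] <;>
          split_ifs <;> simp <;> omega
      · cases f0 <;> simp [Option.or]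
    rw [hstep, ih, bestM_cons]
    simp only [Prod.mk.injEq]
    constructor
    · split_ifs with h
      · exact minb_assoc b0 (some (prOrder.idxOf p)) (bestM t)
      · rfl
    · cases f0 <;> simp [Option.or]

theorem finish_eq (L : List String) :
    (match (["Critical", "High", "Medium", "Low"] : List String).find?
        (fun p => L.contains p) with
      | some p => some p
      | none => L.head?) =
    (match bestM L with
      | some r => prOrder[r]?
      | none => L.head?) := by
  simp only [bestM, List.find?]
  split_ifs with h0 h1 h2 h3 <;> simp_all [prOrder]

theorem extract_rpf_priority_py_spec : Claim_equal_extract_rpf_priority_py := by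
  intro ps _
  unfold Spec_extract_rpf_priority_py
  by_cases h : ps = []
  · subst h; rfl
  · simp only [extract_rpf_priority_py, extract_rpf_priority_py_alt, h, if_false]
    rw [foldA_eq, foldB_eq, foldUpd_eq]
    simpa [minb, Option.or] using finish_eq (ps.filterMap fTruthy)
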